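-- pv_equiv track=rewrite | github.com/dhdnzk/baekjoon_algorithm | 8958.py | score_calculator
-- ===== SOURCE A (Python) =====
-- def score_calculator(ox_string):
--     score_of_this_prob = 1
--     total_score = 0
--
--     for idx in range(0, ox_string.__len__()):
--         if ox_string[idx].upper() == "O":
--             total_score += score_of_this_prob
--             score_of_this_prob += 1
--         else:
--             score_of_this_prob = 1
--
--     return total_score
-- ===== SOURCE B (Python) =====
-- def score_calculator(ox_string):
--     total = 0
--     i = 0
--     n = len(ox_string)
--     while i < n:
--         if ox_string[i].upper() == "O":
--             j = i + 1
--             while j < n and ox_string[j].upper() == "O":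
--                 j += 1
--             run = j - i
--             total += run * (run + 1) // 2
--             i = j
--         else:
--             i += 1
--     return total
-- ===== Notes on version B (the rewrite author's own statement) =====
-- stated objective: alternative
-- what changed: Replaces the per-character streak counter with a run decomposition: B scans to the end of each maximal run of hit answers (case-insensitive) and adds its triangular number L*(L+1)//2 in one step.
import Mathlib
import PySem

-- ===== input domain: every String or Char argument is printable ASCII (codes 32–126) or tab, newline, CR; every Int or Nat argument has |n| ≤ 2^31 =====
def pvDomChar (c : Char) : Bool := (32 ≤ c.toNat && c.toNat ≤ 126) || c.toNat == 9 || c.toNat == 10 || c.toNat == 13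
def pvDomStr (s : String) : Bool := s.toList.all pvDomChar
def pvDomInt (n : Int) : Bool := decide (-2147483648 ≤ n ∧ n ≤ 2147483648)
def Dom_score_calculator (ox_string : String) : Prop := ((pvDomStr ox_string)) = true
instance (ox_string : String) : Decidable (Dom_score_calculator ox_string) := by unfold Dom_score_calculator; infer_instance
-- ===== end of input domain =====

-- B replaces A's per-character streak counter with a run decomposition adding run*(run+1)//2
-- per maximal hit run (an alternative algorithm of the same cost); exact on the ASCII domain.


-- ===== PORT A =====
-- shared single-character test 'c.upper() == "O"' (exact on the ASCII domain)
def pvIsO (c : Char) : Bool := PySem.Chars.upperChar c == 'O'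

-- for idx in range(0, len(s)): the index is always in range, so s[idx] is ported with pyGetD;
-- loop state = (score_of_this_prob, total_score)
def score_calculator (ox_string : String) : Int :=
  ((PySem.List.pyRange 0 (PySem.Str.len ox_string) 1).foldl
    (fun (st : Int × Int) idx =>
      if pvIsO (PySem.List.pyGetD ox_string.toList idx ' ') then (st.1 + 1, st.2 + st.1)
      else (1, st.2))
    (1, 0)).2

-- ===== PORT B =====
-- outer while loop of Source B: at an 'O' the inner while loop (takeWhile) finds the end of the
-- maximal run, its triangular number run*(run+1)//2 is added, and the scan resumes after the run
def pvRuns : List Char → Int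
  | [] => 0
  | c :: rest =>
    if pvIsO c then
      let run : Int := 1 + (rest.takeWhile pvIsO).length
      PySem.Int.floordiv (run * (run + 1)) 2 + pvRuns (rest.dropWhile pvIsO)
    else pvRuns rest
termination_by cs => cs.length
decreasing_by
  · exact Nat.lt_succ_of_le (List.length_dropWhile_le _ _)
  · exact Nat.lt_succ_self _

def score_calculator_alt (ox_string : String) : Int := pvRuns ox_string.toList

-- ===== PRECONDITION & SPEC =====
def Spec_score_calculator (ox_string : String) (out : Int) : Prop := out = score_calculator_alt ox_string
instance (ox_string : String) (out : Int) : Decidable (Spec_score_calculator ox_string out) := by unfold Spec_score_calculator; infer_instance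

-- ===== CLAIM (what is proved, stated in full; the proofs are below) =====
def Claim_equal_score_calculator : Prop := ∀ (ox_string : String), Dom_score_calculator ox_string → Spec_score_calculator ox_string (score_calculator ox_string)

-- ===== LEMMAS AND PROOFS =====

-- A's loop body as a function of the character
def pvStepA (st : Int × Int) (c : Char) : Int × Int :=
  if pvIsO c then (st.1 + 1, st.2 + st.1) else (1, st.2)

lemma pv_tri_step (k : Nat) : k * (k + 1) / 2 = k + k * (k - 1) / 2 := by
  have hb : 2 * (k * (k + 1) / 2) = k * (k + 1) :=
    Nat.two_mul_div_two_of_even (Nat.even_mul_succ_self k)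
  have ha : 2 * (k * (k - 1) / 2) = k * (k - 1) := by
    cases k with
    | zero => simp
    | succ n =>
      have he : Even ((n + 1) * n) := by rw [Nat.mul_comm]; exact Nat.even_mul_succ_self n
      simpa using Nat.two_mul_div_two_of_even he
  have hk : k * (k + 1) = k * (k - 1) + 2 * k := by
    cases k with
    | zero => simp
    | succ n => simp; ring
  omega

-- a run of all-O characters advances A's state by (length, arithmetic-progression sum)
lemma pv_run_foldl (u : List Char) (hu : ∀ x ∈ u, pvIsO x = true) (v : List Char)
    (p t : Int) :
    (u ++ v).foldl pvStepA (p, t)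
      = v.foldl pvStepA (p + u.length, t + u.length * p + (u.length * (u.length - 1) / 2 : Nat)) := by
  induction u generalizing p t with
  | nil => simp
  | cons a u' ih =>
    have ha : pvIsO a = true := hu a (by simp)
    have hu' : ∀ x ∈ u', pvIsO x = true := fun x hx => hu x (by simp [hx])
    rw [List.cons_append, List.foldl_cons]
    simp only [pvStepA, ha, if_pos]
    rw [ih hu']
    have h2 : (u'.length + 1) * (u'.length + 1 - 1) / 2
        = u'.length + u'.length * (u'.length - 1) / 2 := by
      simpa [Nat.mul_comm] using pv_tri_step u'.length
    simp only [List.length_cons, h2]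
    congr 1
    refine Prod.ext ?_ ?_ <;> (dsimp only; push_cast; ring)

-- the triangular number B adds for a run of length k+1, related to A's progression sum
lemma pv_tri_floordiv (k : Nat) :
    PySem.Int.floordiv ((1 + (k : Int)) * (1 + (k : Int) + 1)) 2
      = ((k + 1 : Nat) : Int) + (((k + 1) * k / 2 : Nat) : Int) := by
  have h1 : (1 + (k : Int)) * (1 + (k : Int) + 1) = (((k + 1) * (k + 1 + 1) : Nat) : Int) := by
    push_cast; ring
  have h4 : PySem.Int.floordiv (((k + 1) * (k + 1 + 1) : Nat) : Int) 2
      = (((k + 1) * (k + 1 + 1) / 2 : Nat) : Int) := by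
    exact_mod_cast PySem.Int.floordiv_natCast ((k + 1) * (k + 1 + 1)) 2
  rw [h1, h4]
  have h2 := pv_tri_step (k + 1)
  rw [Nat.add_sub_cancel] at h2
  rw [h2]
  push_cast; ring

-- main invariant: A's fold starting at score_of_this_prob = 1 computes t + pvRuns cs
lemma pv_main : ∀ n (cs : List Char), cs.length ≤ n → ∀ t : Int,
    (cs.foldl pvStepA (1, t)).2 = t + pvRuns cs := by
  intro n
  induction n with
  | zero =>
    intro cs h t
    have : cs = [] := List.eq_nil_of_length_eq_zero (Nat.le_zero.mp h)
    subst this; simp [pvRuns]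
  | succ n ih =>
    intro cs h t
    match cs with
    | [] => simp [pvRuns]
    | c :: rest =>
      have hrest : rest.length ≤ n := by simp at h; omega
      by_cases hc : pvIsO c = true
      · have hdecomp : rest.takeWhile pvIsO ++ rest.dropWhile pvIsO = rest :=
          List.takeWhile_append_dropWhile
        have hall : ∀ x ∈ c :: rest.takeWhile pvIsO, pvIsO x = true := by
          intro x hx
          rcases List.mem_cons.mp hx with rfl | hx
          · exact hc
          · exact List.mem_takeWhile_imp hx
        have hcs : (c :: rest) = (c :: rest.takeWhile pvIsO) ++ rest.dropWhile pvIsO := by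
          rw [List.cons_append, hdecomp]
        have hfold := pv_run_foldl (c :: rest.takeWhile pvIsO) hall (rest.dropWhile pvIsO) 1 t
        rw [← hcs] at hfold
        rw [hfold]
        have hnil : pvRuns [] = 0 := by rw [pvRuns]
        have hruns : pvRuns (c :: rest)
            = PySem.Int.floordiv ((1 + ((rest.takeWhile pvIsO).length : Int))
                * (1 + ((rest.takeWhile pvIsO).length : Int) + 1)) 2
              + pvRuns (rest.dropWhile pvIsO) := by
          rw [pvRuns]; simp [hc]
        cases hvcase : rest.dropWhile pvIsO with
        | nil =>
          rw [List.foldl_nil, hruns, hvcase, hnil, pv_tri_floordiv]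
          simp only [List.length_cons, Nat.add_sub_cancel]
          push_cast; ring
        | cons d ds =>
          have hd : pvIsO d = false := by
            have h1 : (rest.dropWhile pvIsO) ≠ [] := by simp [hvcase]
            have hh := List.head_dropWhile_not (l := rest) (p := pvIsO) h1
            have h3 : (rest.dropWhile pvIsO).head h1 = d := by simp [hvcase]
            rw [h3] at hh
            simpa using hh
          have hds : ds.length ≤ n := by
            have := List.length_dropWhile_le pvIsO rest
            rw [hvcase] at this
            simp at this
            omega
          rw [List.foldl_cons]
          have hstep : ∀ q T : Int, pvStepA (q, T) d = (1, T) := by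
            intro q T; simp [pvStepA, hd]
          rw [hstep, ih ds hds]
          have hruns' : pvRuns (d :: ds) = pvRuns ds := by rw [pvRuns]; simp [hd]
          rw [hruns, hvcase, hruns', pv_tri_floordiv]
          simp only [List.length_cons, Nat.add_sub_cancel]
          push_cast; ring
      · rw [List.foldl_cons]
        have hstep : pvStepA (1, t) c = (1, t) := by simp [pvStepA, hc]
        rw [hstep, ih rest hrest t]
        have : pvRuns (c :: rest) = pvRuns rest := by rw [pvRuns]; simp [hc]
        rw [this]

-- bridge: the index loop of port A is a fold over the characters
lemma pv_A_eq_fold (s : String) :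
    score_calculator s = (s.toList.foldl pvStepA (1, 0)).2 := by
  unfold score_calculator
  rw [show (PySem.Str.len s) = ((s.toList.length : Int)) by simp]
  show ((PySem.List.pyRange 0 (s.toList.length : Int) 1).foldl
    (fun (acc : Int × Int) j => pvStepA acc (PySem.List.pyGetD s.toList j ' ')) (1, 0)).2 = _
  rw [PySem.List.foldl_pyRange_zero_pyGetD' s.toList ' ' pvStepA ((1 : Int), (0 : Int))]

-- ===== VERDICT (by name: the statement is the Claim_ definition above) =====
theorem score_calculator_spec : Claim_equal_score_calculator := by
  intro s _
  unfold Spec_score_calculator score_calculator_alt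
  rw [pv_A_eq_fold]
  simpa using pv_main s.toList.length s.toList le_rfl 0
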